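-- pv_equiv track=rewrite | github.com/henryennis/Lean.DataSource.USDAFruitAndVegetables | DataProcessing/src/model/series_code.py | _normalize_segment_case
-- ===== SOURCE A (Python) =====
-- def _normalize_segment_case(value: str) -> str:
--     result: list[str] = []
--     seen_alpha = False
--     in_parens = 0
--     for char in value:
--         if char == "(":
--             in_parens += 1
--             result.append(char)
--             continue
--         if char == ")":
--             if in_parens > 0:
--                 in_parens -= 1
--             result.append(char)
--             continue
--         if in_parens:
--             result.append(char)
--             continue
--         if not seen_alpha and char.isalpha():
--             result.append(char.upper())
--             seen_alpha = True
--             continue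
--         if seen_alpha and char.isalpha():
--             result.append(char.lower())
--             continue
--         result.append(char)
--     return "".join(result)
-- ===== SOURCE B (Python) =====
-- def _normalize_segment_case(value: str) -> str:
--     # Pass 1: nesting depth per position; record index of first outside alphabetic char.
--     outside = []
--     depth = 0
--     target = None
--     for i, ch in enumerate(value):
--         if ch == "(":
--             depth += 1
--             outside.append(False)
--         elif ch == ")":
--             depth = max(0, depth - 1)
--             outside.append(False)
--         else:
--             outside.append(depth == 0)
--             if depth == 0 and target is None and ch.isalpha():
--                 target = i
--     # Pass 2: map each char using the precomputed target index.
--     out = []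
--     for i, ch in enumerate(value):
--         if outside[i] and ch.isalpha():
--             out.append(ch.upper() if i == target else ch.lower())
--         else:
--             out.append(ch)
--     return "".join(out)
-- ===== Notes on version B (the rewrite author's own statement) =====
-- stated objective: alternative
-- what changed: Replaces A's single stateful scan (running seen_alpha flag casing chars as it goes) by two passes: pass one computes a depth-0 mask and the index of the first alphabetic character at depth 0, pass two maps each character against that precomputed target index.
import Mathlib
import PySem

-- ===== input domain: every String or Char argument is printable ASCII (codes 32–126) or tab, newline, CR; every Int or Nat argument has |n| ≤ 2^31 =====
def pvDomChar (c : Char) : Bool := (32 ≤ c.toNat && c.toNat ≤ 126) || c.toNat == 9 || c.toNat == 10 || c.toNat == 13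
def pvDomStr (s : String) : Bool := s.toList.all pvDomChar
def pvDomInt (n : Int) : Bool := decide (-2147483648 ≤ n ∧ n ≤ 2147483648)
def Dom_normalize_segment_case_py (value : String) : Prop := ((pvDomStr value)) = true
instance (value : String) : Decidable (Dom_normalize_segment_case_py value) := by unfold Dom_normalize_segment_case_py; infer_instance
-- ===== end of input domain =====

-- B re-implements A's single stateful scan as two passes (outside-mask + first-alpha index, then map); alternative decomposition, same cost.


-- ===== PORT A =====
-- fold state = (result, seen_alpha, in_parens), exactly A's loop
def pvAStep (st : List Char × Bool × Int) (c : Char) : List Char × Bool × Int :=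
  let (res, seen, inp) := st
  if c = '(' then (res ++ [c], seen, inp + 1)
  else if c = ')' then (res ++ [c], seen, if inp > 0 then inp - 1 else inp)
  else if inp ≠ 0 then (res ++ [c], seen, inp)
  else if !seen && PySem.Chars.isalpha c then (res ++ [PySem.Chars.upperChar c], true, inp)
  else if seen && PySem.Chars.isalpha c then (res ++ [PySem.Chars.lowerChar c], seen, inp)
  else (res ++ [c], seen, inp)

def normalize_segment_case_py (value : String) : String :=
  String.ofList (value.toList.foldl pvAStep ([], false, 0)).1

-- ===== PORT B =====
-- pass 1 of Source B: outside-mask and first outside alphabetic index (i = current index, d = depth, t = target)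
def pvBScan : List Char → Nat → Int → Option Nat → List Bool × Option Nat
  | [], _, _, t => ([], t)
  | c :: cs, i, d, t =>
    if c = '(' then
      let r := pvBScan cs (i + 1) (d + 1) t
      (false :: r.1, r.2)
    else if c = ')' then
      let r := pvBScan cs (i + 1) (max 0 (d - 1)) t
      (false :: r.1, r.2)
    else
      let t1 := if d == 0 && t == none && PySem.Chars.isalpha c then some i else t
      let r := pvBScan cs (i + 1) d t1
      ((d == 0) :: r.1, r.2)

-- pass 2 of Source B: map each char against the precomputed target index
def pvBEmit : List Bool → List Char → Nat → Option Nat → List Char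
  | ob :: os, c :: cs, i, t =>
    (if ob && PySem.Chars.isalpha c then
       (if t == some i then PySem.Chars.upperChar c else PySem.Chars.lowerChar c)
     else c) :: pvBEmit os cs (i + 1) t
  | _, _, _, _ => []

def normalize_segment_case_py_alt (value : String) : String :=
  let r := pvBScan value.toList 0 0 none
  String.ofList (pvBEmit r.1 value.toList 0 r.2)

-- ===== PRECONDITION & SPEC =====
def Spec_normalize_segment_case_py (value : String) (out : String) : Prop := out = normalize_segment_case_py_alt value
instance (value : String) (out : String) : Decidable (Spec_normalize_segment_case_py value out) := by unfold Spec_normalize_segment_case_py; infer_instance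

-- ===== CLAIM (what is proved, stated in full; the proofs are below) =====
def Claim_equal_normalize_segment_case_py : Prop := ∀ (value : String), Dom_normalize_segment_case_py value → Spec_normalize_segment_case_py value (normalize_segment_case_py value)

-- ===== LEMMAS AND PROOFS =====

-- A's loop rewritten as structural recursion (result only)
def pvAGo : List Char → Bool → Int → List Char
  | [], _, _ => []
  | c :: cs, seen, inp =>
    if c = '(' then c :: pvAGo cs seen (inp + 1)
    else if c = ')' then c :: pvAGo cs seen (if inp > 0 then inp - 1 else inp)
    else if inp ≠ 0 then c :: pvAGo cs seen inp
    else if !seen && PySem.Chars.isalpha c then PySem.Chars.upperChar c :: pvAGo cs true inp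
    else if seen && PySem.Chars.isalpha c then PySem.Chars.lowerChar c :: pvAGo cs seen inp
    else c :: pvAGo cs seen inp

theorem pvAFold_eq (cs : List Char) : ∀ (acc : List Char) (seen : Bool) (inp : Int),
    (cs.foldl pvAStep (acc, seen, inp)).1 = acc ++ pvAGo cs seen inp := by
  induction cs with
  | nil => intro acc seen inp; simp [pvAGo]
  | cons c cs ih =>
    intro acc seen inp
    simp only [List.foldl, pvAStep, pvAGo]
    split_ifs <;> simp [ih]

-- once a target is set, the scan never changes it
theorem pvBScan_some (cs : List Char) : ∀ (i : Nat) (d : Int) (k : Nat),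
    (pvBScan cs i d (some k)).2 = some k := by
  induction cs with
  | nil => intro i d k; simp [pvBScan]
  | cons c cs ih =>
    intro i d k
    simp only [pvBScan]
    split_ifs with h1 h2 h3
    · exact ih _ _ _
    · exact ih _ _ _
    · simp at h3
    · exact ih _ _ _

theorem pv_key (cs : List Char) : ∀ (i : Nat) (d : Int) (t : Option Nat),
    0 ≤ d → (∀ k, t = some k → k < i) →
    pvBEmit (pvBScan cs i d t).1 cs i (pvBScan cs i d t).2 = pvAGo cs t.isSome d := by
  induction cs with
  | nil => intro i d t _ _; simp [pvBScan, pvBEmit, pvAGo]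
  | cons c cs ih =>
    intro i d t hd ht
    by_cases hp : c = '('
    · have htail := ih (i + 1) (d + 1) t (by omega) (fun k hk => Nat.lt_succ_of_lt (ht k hk))
      simp only [pvBScan, pvBEmit, pvAGo, if_pos hp]
      simp [htail]
    · by_cases hq : c = ')'
      · have hdep : (if d > 0 then d - 1 else d) = max 0 (d - 1) := by split_ifs <;> omega
        have htail := ih (i + 1) (max 0 (d - 1)) t (by omega)
          (fun k hk => Nat.lt_succ_of_lt (ht k hk))
        simp only [pvBScan, pvBEmit, pvAGo, if_neg hp, if_pos hq, hdep]
        simp [htail]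
      · by_cases hd0 : d = 0
        · subst hd0
          by_cases hts : t = none
          · subst hts
            by_cases ha : PySem.Chars.isalpha c = true
            · have h2 := pvBScan_some cs (i + 1) 0 i
              have htail := ih (i + 1) 0 (some i) le_rfl (fun k hk => by cases hk; omega)
              rw [h2] at htail
              simp only [Option.isSome_some] at htail
              simp only [pvBScan, pvBEmit, pvAGo, if_neg hp, if_neg hq, ha]
              simp [h2, htail]
            · have htail := ih (i + 1) 0 none le_rfl (fun k hk => by cases hk)
              simp only [Option.isSome_none] at htail
              simp only [pvBScan, pvBEmit, pvAGo, if_neg hp, if_neg hq]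
              simp [ha, htail]
          · obtain ⟨k, hk⟩ := Option.ne_none_iff_exists'.mp hts
            subst hk
            have hki : k < i := ht k rfl
            have h2 := pvBScan_some cs (i + 1) 0 k
            have htail := ih (i + 1) 0 (some k) le_rfl (fun k' hk' => by cases hk'; omega)
            rw [h2] at htail
            simp only [Option.isSome_some] at htail
            have hne : (some k == some i) = false := by simp; omega
            simp only [pvBScan, pvBEmit, pvAGo, if_neg hp, if_neg hq]
            simp [h2, htail, hne]
            split_ifs <;> rfl
        · have hb : (d == 0) = false := by simp [hd0]
          have htail := ih (i + 1) d t hd (fun k hk => Nat.lt_succ_of_lt (ht k hk))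
          simp only [pvBScan, pvBEmit, pvAGo, if_neg hp, if_neg hq, hb]
          simp [hd0, htail]

-- ===== VERDICT (by name: the statement is the Claim_ definition above) =====
theorem normalize_segment_case_py_spec : Claim_equal_normalize_segment_case_py := by
  intro value _
  unfold Spec_normalize_segment_case_py normalize_segment_case_py normalize_segment_case_py_alt
  have h := pv_key value.toList 0 0 none le_rfl (fun k hk => by simp at hk)
  simp only [Option.isSome_none] at h
  rw [pvAFold_eq]
  simp [← h]
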